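-- pv_equiv track=rewrite | github.com/trezor/trezor-firmware | core/src/apps/monero/xmr/serialize/int_serialize.py | load_uvarint_b
-- ===== SOURCE A (Python) =====
-- def load_uvarint_b(buffer):
--     """
--     Variable int deserialization, synchronous from buffer.
--     """
--     result = 0
--     idx = 0
--     byte = 0x80
--     while byte & 0x80:
--         byte = buffer[idx]
--         result += (byte & 0x7F) << (7 * idx)
--         idx += 1
--     return result
-- ===== SOURCE B (Python) =====
-- def load_uvarint_b(buffer):
--     """
--     Variable int deserialization, synchronous from buffer.
--     """
--     # Pass 1: gather the 7-bit groups (same indexing, same IndexError on exhaustion).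
--     groups = []
--     idx = 0
--     while True:
--         byte = buffer[idx]
--         groups.append(byte & 0x7F)
--         idx += 1
--         if not (byte & 0x80):
--             break
--     # Pass 2: Horner fold, most-significant group first.
--     result = 0
--     for g in reversed(groups):
--         result = result * 128 + g
--     return result
-- ===== Notes on version B (the rewrite author's own statement) =====
-- stated objective: alternative
-- what changed: Replaced the single interleaved loop that weights each byte by a position-indexed shift (<< 7*idx) with a gather-then-fold: first collect the 7-bit groups, then combine them by Horner's rule over the reversed list (result = result*128 + group).
import Mathlib
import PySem

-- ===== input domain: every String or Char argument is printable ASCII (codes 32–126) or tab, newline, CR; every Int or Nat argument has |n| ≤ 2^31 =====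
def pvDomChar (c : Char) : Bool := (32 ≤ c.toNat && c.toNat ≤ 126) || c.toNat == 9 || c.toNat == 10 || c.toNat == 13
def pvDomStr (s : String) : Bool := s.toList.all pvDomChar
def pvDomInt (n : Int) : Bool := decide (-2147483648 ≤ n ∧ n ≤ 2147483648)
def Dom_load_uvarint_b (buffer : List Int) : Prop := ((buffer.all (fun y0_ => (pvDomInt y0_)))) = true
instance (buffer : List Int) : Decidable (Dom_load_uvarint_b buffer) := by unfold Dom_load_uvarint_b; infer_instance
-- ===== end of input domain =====

-- B replaces A's interleaved shift-by-position accumulation with a gather-then-Horner-fold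
-- decomposition (alternative, same cost); equivalence of return values proved on Pre_.


-- ===== PORT A =====
-- A's while loop, walking the buffer front-to-back by index; the `[]` case is
-- Python's IndexError (excluded by Pre_; the returned value there is irrelevant).
def loadLoopA : List Int → Nat → Int → Int
  | [], _, result => result
  | b :: rest, idx, result =>
      let result := result + (PySem.Int.band b 127) <<< (7 * idx)
      if PySem.Int.band b 128 ≠ 0 then loadLoopA rest (idx + 1) result else result

def load_uvarint_b (buffer : List Int) : Int := loadLoopA buffer 0 0

-- ===== PORT B =====
-- Pass 1 of Source B: collect the 7-bit groups until a byte without the high bit.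
def gatherGroups : List Int → List Int
  | [] => []
  | b :: rest => if PySem.Int.band b 128 ≠ 0 then (PySem.Int.band b 127) :: gatherGroups rest else [PySem.Int.band b 127]

-- Pass 2 of Source B: Horner fold over the reversed group list.
def load_uvarint_b_alt (buffer : List Int) : Int :=
  (gatherGroups buffer).reverse.foldl (fun r g => r * 128 + g) 0

-- ===== PRECONDITION & SPEC =====
-- Pre_ excludes exactly the buffers on which Python A raises IndexError: those with
-- no terminating byte (high bit clear); both A and B raise there.
def Pre_load_uvarint_b (buffer : List Int) : Prop :=
  (buffer.any (fun b => PySem.Int.band b 128 == 0)) = true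
instance (buffer : List Int) : Decidable (Pre_load_uvarint_b buffer) := by
  unfold Pre_load_uvarint_b; infer_instance

def pvWitness_load_uvarint_b : List Int := [129, 2]

def Spec_load_uvarint_b (buffer : List Int) (out : Int) : Prop := out = load_uvarint_b_alt buffer
instance (buffer : List Int) (out : Int) : Decidable (Spec_load_uvarint_b buffer out) := by unfold Spec_load_uvarint_b; infer_instance

-- ===== CLAIM (what is proved, stated in full; the proofs are below) =====
def Claim_equal_load_uvarint_b : Prop := ∀ (buffer : List Int), Dom_load_uvarint_b buffer → Pre_load_uvarint_b buffer → Spec_load_uvarint_b buffer (load_uvarint_b buffer)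

-- ===== LEMMAS AND PROOFS =====

-- Horner value of a group list, as a foldr (= Source B's fold over the reversed list).
theorem horner_eq_foldr (gs : List Int) :
    gs.reverse.foldl (fun r g => r * 128 + g) 0 = gs.foldr (fun g r => r * 128 + g) 0 := by
  rw [List.foldl_reverse]

theorem loadLoopA_eq (buffer : List Int) (idx : Nat) (result : Int) :
    loadLoopA buffer idx result
      = result + (gatherGroups buffer).foldr (fun g r => r * 128 + g) 0 * 2 ^ (7 * idx) := by
  induction buffer generalizing idx result with
  | nil => simp [loadLoopA, gatherGroups]
  | cons b rest ih =>
    simp only [loadLoopA, gatherGroups]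
    by_cases h : PySem.Int.band b 128 ≠ 0
    · simp only [if_pos h, ih, List.foldr_cons]
      have hs : (PySem.Int.band b 127) <<< (7 * idx) = (PySem.Int.band b 127) * 2 ^ (7 * idx) := by
        rw [Int.shiftLeft_eq]
      have hp : (2 : Int) ^ (7 * (idx + 1)) = 2 ^ (7 * idx) * 128 := by
        rw [Nat.mul_add, pow_add]; norm_num
      rw [hs, hp]; ring
    · simp only [if_neg h, List.foldr_cons, List.foldr_nil]
      rw [Int.shiftLeft_eq]; ring

-- ===== VERDICT (by name: the statement is the Claim_ definition above) =====
theorem load_uvarint_b_spec : Claim_equal_load_uvarint_b := by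
  intro buffer _ _
  unfold Spec_load_uvarint_b load_uvarint_b load_uvarint_b_alt
  rw [horner_eq_foldr, loadLoopA_eq]
  simp
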